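-- pv_equiv track=rewrite | github.com/anezih/guncel-turkce-sozluk-kindle-kobo-stardict | src/gts_convert.py | fix_quotes
-- ===== SOURCE A (Python) =====
-- def fix_quotes(text: str) -> str:
--     text = text.replace("'","’")
--     out = []
--     is_first_found = False
--     for char in text:
--         if char == '`':
--             new_char = '‘' if not is_first_found else '’ '
--             is_first_found = True
--         else:
--             new_char = char
--         out.append(new_char)
--     return ''.join(out).strip()
-- ===== SOURCE B (Python) =====
-- def fix_quotes(text: str) -> str:
--     text = text.replace("'", "\u2019")
--     i = text.find("`")
--     if i != -1:
--         text = text[:i] + "\u2018" + text[i+1:].replace("`", "\u2019 ")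
--     return text.strip()
-- ===== Notes on version B (the rewrite author's own statement) =====
-- stated objective: simpler
-- what changed: Replaces the stateful per-character loop with a boolean first-backtick flag by whole-string operations: find the first backtick, rebuild via slicing plus one replace on the tail, then strip.
import Mathlib
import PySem

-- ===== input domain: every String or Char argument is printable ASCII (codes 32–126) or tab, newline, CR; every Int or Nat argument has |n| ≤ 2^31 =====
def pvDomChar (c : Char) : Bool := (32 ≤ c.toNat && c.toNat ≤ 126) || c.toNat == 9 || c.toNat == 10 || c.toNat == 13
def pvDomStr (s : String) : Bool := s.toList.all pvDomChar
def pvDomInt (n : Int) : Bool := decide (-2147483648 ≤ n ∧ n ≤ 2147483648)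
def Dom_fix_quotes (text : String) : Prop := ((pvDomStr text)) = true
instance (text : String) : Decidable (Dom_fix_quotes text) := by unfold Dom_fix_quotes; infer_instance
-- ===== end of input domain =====

-- B replaces A's per-character loop with a boolean flag by find + slicing + one replace on the tail (simpler decomposition; same result).

-- ===== PORT A =====
-- for char in text: append '‘' for the first backtick, '’ ' for later ones, the char otherwise; then join and strip
def fix_quotes (text : String) : String :=
  let t := PySem.Chars.replace text.toList ['\''] ['’']
  let res := t.foldl (fun (st : Bool × List (List Char)) c =>
    if c = '`' then (true, st.2 ++ [if st.1 then ['’', ' '] else ['‘']])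
    else (st.1, st.2 ++ [[c]])) (false, [])
  String.ofList (PySem.Chars.strip res.2.flatten)

-- ===== PORT B =====
def fix_quotes_alt (text : String) : String :=
  let t := PySem.Chars.replace text.toList ['\''] ['’']
  let i := PySem.Chars.find t ['`']
  let t2 := if i ≠ -1 then
      PySem.List.slice t none (some i) ++ ['‘'] ++
        PySem.Chars.replace (PySem.List.slice t (some (i + 1)) none) ['`'] ['’', ' ']
    else t
  String.ofList (PySem.Chars.strip t2)

-- ===== PRECONDITION & SPEC =====
def Spec_fix_quotes (text : String) (out : String) : Prop := out = fix_quotes_alt text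
instance (text : String) (out : String) : Decidable (Spec_fix_quotes text out) := by unfold Spec_fix_quotes; infer_instance

-- ===== CLAIM (what is proved, stated in full; the proofs are below) =====
def Claim_equal_fix_quotes : Prop := ∀ (text : String), Dom_fix_quotes text → Spec_fix_quotes text (fix_quotes text)

-- ===== LEMMAS AND PROOFS =====

-- A's loop, flattened output, as a structural recursion (proof-only helper)
def bRec : List Char → Bool → List Char
  | [], _ => []
  | c :: t, b => (if c = '`' then (if b then ['’', ' '] else ['‘']) else [c]) ++ bRec t (b || (c = '`'))

theorem foldl_step_flatten : ∀ (cs : List Char) (b : Bool) (out : List (List Char)),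
    ((cs.foldl (fun (st : Bool × List (List Char)) c =>
      if c = '`' then (true, st.2 ++ [if st.1 then ['’', ' '] else ['‘']])
      else (st.1, st.2 ++ [[c]])) (b, out)).2).flatten = out.flatten ++ bRec cs b := by
  intro cs
  induction cs with
  | nil => intro b out; simp [bRec]
  | cons c t ih =>
    intro b out
    by_cases hc : c = '`' <;> simp [List.foldl_cons, hc, bRec, ih]

theorem replace_go_single (o : Char) (new : List Char) :
    ∀ (l : List Char) (fuel : Nat) (acc : List Char), l.length ≤ fuel →
      PySem.Chars.replace.go [o] new fuel l acc
        = acc.reverse ++ l.flatMap (fun c => if c = o then new else [c]) := by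
  intro l
  induction l with
  | nil =>
    intro fuel acc _
    cases fuel <;> simp [PySem.Chars.replace.go]
  | cons c t ih =>
    intro fuel acc hlen
    cases fuel with
    | zero => simp at hlen
    | succ fuel =>
      simp only [PySem.Chars.replace.go]
      by_cases hc : c = o
      · have hp : [o].isPrefixOf (c :: t) = true := by
          simp [List.isPrefixOf, hc]
        simp only [hp, if_pos]
        have hd : List.drop [o].length (c :: t) = t := by simp
        rw [hd, ih _ _ (by simpa using Nat.le_of_succ_le_succ hlen)]
        simp [hc]
      · have hp : [o].isPrefixOf (c :: t) = false := by
          simp [List.isPrefixOf]; exact fun h => hc h.symm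
        simp only [hp]
        rw [if_neg (by simp)]
        rw [ih _ _ (by simpa using Nat.le_of_succ_le_succ hlen)]
        simp [hc]

theorem replace_single (o : Char) (new : List Char) (l : List Char) :
    PySem.Chars.replace l [o] new = l.flatMap (fun c => if c = o then new else [c]) := by
  unfold PySem.Chars.replace
  rw [if_neg (by simp)]
  simpa using replace_go_single o new l l.length [] (le_refl _)

theorem find_go_single (o : Char) :
    ∀ (l : List Char) (k : Nat),
      PySem.Chars.find.go [o] l k = if o ∈ l then ((k + l.idxOf o : Nat) : Int) else -1 := by
  intro l
  induction l with
  | nil => intro k; simp [PySem.Chars.find.go]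
  | cons c t ih =>
    intro k
    by_cases hc : c = o
    · have hp : [o].isPrefixOf (c :: t) = true := by simp [List.isPrefixOf, hc]
      simp [PySem.Chars.find.go, hc, List.idxOf_cons_self]
    · have hp : [o].isPrefixOf (c :: t) = false := by
        simp [List.isPrefixOf]; exact fun h => hc h.symm
      have hne : ¬ o = c := fun h => hc h.symm
      simp only [PySem.Chars.find.go, hp, Bool.false_eq_true, if_false, ih]
      by_cases hm : o ∈ t
      · rw [if_pos hm, if_pos (by simp [hm])]
        rw [List.idxOf_cons_ne _ hc]
        push_cast; ring
      · rw [if_neg hm, if_neg (by simp [hm, hne])]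

theorem find_single (o : Char) (l : List Char) :
    PySem.Chars.find l [o] = if o ∈ l then (l.idxOf o : Int) else -1 := by
  unfold PySem.Chars.find
  simpa using find_go_single o l 0

theorem bRec_true (cs : List Char) :
    bRec cs true = cs.flatMap (fun c => if c = '`' then ['’', ' '] else [c]) := by
  induction cs with
  | nil => simp [bRec]
  | cons c t ih => simp [bRec, ih]

theorem bRec_no_tick : ∀ (cs : List Char), '`' ∉ cs → bRec cs false = cs := by
  intro cs
  induction cs with
  | nil => intro _; simp [bRec]
  | cons c t ih =>
    intro h
    have hc : ¬ c = '`' := fun hh => h (by simp [hh])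
    simp [bRec, hc, ih (fun hm => h (by simp [hm]))]

theorem bRec_split : ∀ (pre r : List Char), '`' ∉ pre →
    bRec (pre ++ '`' :: r) false = pre ++ '‘' :: bRec r true := by
  intro pre
  induction pre with
  | nil => intro r _; simp [bRec]
  | cons c t ih =>
    intro r h
    have hc : ¬ c = '`' := fun hh => h (by simp [hh])
    simp [bRec, hc, ih r (fun hm => h (by simp [hm]))]

theorem not_mem_take_idxOf_self (l : List Char) (a : Char) : a ∉ l.take (l.idxOf a) := by
  intro h
  have ha : a ∈ l := List.mem_of_mem_take h
  have := (List.mem_take_iff_idxOf_lt ha).1 h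
  omega

-- ===== VERDICT (by name: the statement is the Claim_ definition above) =====
theorem fix_quotes_spec : Claim_equal_fix_quotes := by
  intro text _
  unfold Spec_fix_quotes fix_quotes fix_quotes_alt
  set t := PySem.Chars.replace text.toList ['\''] ['’'] with ht
  simp only [foldl_step_flatten t false [], List.flatten_nil, List.nil_append]
  congr 1
  congr 1
  rw [find_single]
  by_cases hm : '`' ∈ t
  · rw [if_pos hm]
    rw [if_pos (by
      intro h
      have := List.idxOf_lt_length_of_mem hm
      omega)]
    set i := t.idxOf '`' with hi
    have hlt : i < t.length := List.idxOf_lt_length_of_mem hm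
    rw [PySem.List.slice_to t (by positivity)]
    rw [PySem.List.slice_from t (by positivity)]
    have h1 : ((i : Int)).toNat = i := by simp
    have h2 : ((i : Int) + 1).toNat = i + 1 := by omega
    rw [h1, h2]
    have hdecomp : t = t.take i ++ '`' :: t.drop (i + 1) := by
      conv_lhs => rw [← List.take_append_drop i t]
      congr 1
      rw [← List.getElem_cons_drop hlt]
      congr 1
      exact (List.getElem_idxOf hlt).symm ▸ rfl
    rw [replace_single]
    conv_lhs => rw [hdecomp]
    rw [bRec_split _ _ (not_mem_take_idxOf_self t '`')]
    rw [bRec_true]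
    simp
    omega
  · rw [if_neg hm]
    rw [if_neg (by simp)]
    exact bRec_no_tick t hm
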